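-- pv_equiv track=rewrite | github.com/Bayany/NLP_NER | src/crawler/merge_images.py | has_blackpixels
-- ===== SOURCE A (Python) =====
-- def has_blackpixels(img):
--     bp_n = 0
--     has_255_in_left = False
--     for i in range(0, len(img)):
--
--         if(has_255_in_left and img[i] < 10):
--             bp_n += 1
--         if((has_255_in_left and img[i] == 255) and bp_n > 0):
--             has_255_in_left = False
--         elif(img[i] == 255):
--             has_255_in_left = True
--
--     return bp_n > 0
-- ===== SOURCE B (Python) =====
-- def has_blackpixels(img):
--     # find the first white (255) pixel, then check the tail for a black (<10) pixel
--     try: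
--         i = img.index(255)
--     except ValueError:
--         return False
--     return any(x < 10 for x in img[i+1:])
-- ===== Notes on version B (the rewrite author's own statement) =====
-- stated objective: simpler
-- what changed: Replaces the one-pass flag-plus-counter state machine with a two-phase find-then-scan: locate the first 255, then report whether any later pixel is < 10.
import Mathlib
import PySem

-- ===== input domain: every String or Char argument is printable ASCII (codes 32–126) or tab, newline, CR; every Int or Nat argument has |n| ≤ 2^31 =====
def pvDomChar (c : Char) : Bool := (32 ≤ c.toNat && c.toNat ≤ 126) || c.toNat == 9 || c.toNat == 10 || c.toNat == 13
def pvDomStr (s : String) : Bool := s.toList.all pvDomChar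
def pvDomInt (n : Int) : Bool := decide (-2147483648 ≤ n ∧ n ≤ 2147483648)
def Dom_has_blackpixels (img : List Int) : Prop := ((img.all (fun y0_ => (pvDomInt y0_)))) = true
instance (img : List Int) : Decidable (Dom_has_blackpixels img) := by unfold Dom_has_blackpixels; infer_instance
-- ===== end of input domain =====

-- B replaces A's one-pass flag-plus-counter state machine with a simpler find-first-255 then scan-the-tail decomposition; same outputs.

-- ===== PORT A =====
-- the loop over range(0, len(img)) reads img[i] in order, so it is folded over the elements with state (bp_n, has_255_in_left)
def has_blackpixels (img : List Int) : Bool :=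
  let st := img.foldl (fun (s : Int × Bool) x =>
    let bp_n := if s.2 ∧ x < 10 then s.1 + 1 else s.1
    let flag := if (s.2 ∧ x = 255) ∧ bp_n > 0 then false
                else if x = 255 then true else s.2
    (bp_n, flag)) (0, false)
  decide (st.1 > 0)

-- ===== PORT B =====
def has_blackpixels_alt (img : List Int) : Bool :=
  match PySem.List.index? img 255 with
  | none => false
  | some i => (PySem.List.slice img (some ((i + 1 : Nat) : Int)) none).any (fun x => decide (x < 10))

-- ===== PRECONDITION & SPEC =====
def Spec_has_blackpixels (img : List Int) (out : Bool) : Prop := out = has_blackpixels_alt img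
instance (img : List Int) (out : Bool) : Decidable (Spec_has_blackpixels img out) := by unfold Spec_has_blackpixels; infer_instance

-- ===== CLAIM (what is proved, stated in full; the proofs are below) =====
def Claim_equal_has_blackpixels : Prop := ∀ (img : List Int), Dom_has_blackpixels img → Spec_has_blackpixels img (has_blackpixels img)

-- ===== LEMMAS AND PROOFS =====

-- A's loop body
def pvStepA (s : Int × Bool) (x : Int) : Int × Bool :=
  let bp_n := if s.2 ∧ x < 10 then s.1 + 1 else s.1
  let flag := if (s.2 ∧ x = 255) ∧ bp_n > 0 then false
              else if x = 255 then true else s.2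
  (bp_n, flag)

theorem pvStepA_mono (s : Int × Bool) (x : Int) : s.1 ≤ (pvStepA s x).1 := by
  simp only [pvStepA]
  split_ifs <;> omega

theorem pvFold_mono (l : List Int) (s : Int × Bool) : s.1 ≤ (l.foldl pvStepA s).1 := by
  induction l generalizing s with
  | nil => simp
  | cons x xs ih => exact le_trans (pvStepA_mono s x) (ih (pvStepA s x))

-- once bp_n is positive the result stays positive
theorem pvFold_pos (l : List Int) (s : Int × Bool) (h : 0 < s.1) : 0 < (l.foldl pvStepA s).1 := by
  exact lt_of_lt_of_le h (pvFold_mono l s)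

-- with the flag set and bp_n = 0, the fold is positive iff some element is < 10
theorem pvFold_true (l : List Int) :
    (0 < (l.foldl pvStepA (0, true)).1) ↔ (l.any (fun x => decide (x < 10)) = true) := by
  induction l with
  | nil => simp
  | cons x xs ih =>
    simp only [List.foldl_cons, List.any_cons, Bool.or_eq_true, decide_eq_true_eq]
    by_cases hx : x < 10
    · constructor
      · intro _; exact Or.inl hx
      · intro _
        apply pvFold_pos
        simp [pvStepA, hx]
    · have : pvStepA (0, true) x = (0, true) := by
        simp [pvStepA, hx]
      rw [this, ih]
      simp [hx]

-- flag clear, bp_n = 0: positive iff some 255 followed later by a < 10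
theorem pvFold_false (l : List Int) :
    (0 < (l.foldl pvStepA (0, false)).1)
      ↔ (∃ i, PySem.List.index? l 255 = some i ∧ (l.drop (i + 1)).any (fun x => decide (x < 10)) = true) := by
  induction l with
  | nil => simp
  | cons x xs ih =>
    simp only [List.foldl_cons]
    by_cases hx : x = 255
    · subst hx
      have hstep : pvStepA (0, false) 255 = (0, true) := by simp [pvStepA]
      rw [hstep, pvFold_true]
      constructor
      · intro h
        exact ⟨0, PySem.List.index?_cons_self (255 : Int) xs, by simpa using h⟩
      · rintro ⟨i, hi, hany⟩
        have hi0 : i = 0 := by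
          rw [PySem.List.index?_cons_self (255 : Int) xs] at hi
          exact (Option.some_inj.mp hi).symm
        subst hi0
        simpa using hany
    · have hstep : pvStepA (0, false) x = (0, false) := by simp [pvStepA, hx]
      rw [hstep, ih]
      constructor
      · rintro ⟨i, hi, hany⟩
        refine ⟨i + 1, ?_, by simpa using hany⟩
        rw [PySem.List.index?_cons_of_ne xs hx, hi]; rfl
      · rintro ⟨i, hi, hany⟩
        rw [PySem.List.index?_cons_of_ne xs hx] at hi
        cases hj : PySem.List.index? xs (255 : Int) with
        | none => rw [hj] at hi; simp at hi
        | some j =>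
          rw [hj] at hi
          simp at hi
          refine ⟨j, rfl, ?_⟩
          subst hi
          simpa using hany

-- ===== VERDICT (by name: the statement is the Claim_ definition above) =====
theorem has_blackpixels_spec : Claim_equal_has_blackpixels := by
  intro img _
  unfold Spec_has_blackpixels has_blackpixels has_blackpixels_alt
  show (decide (0 < (img.foldl pvStepA (0, false)).1)) = _
  cases h : PySem.List.index? img (255 : Int) with
  | none =>
    dsimp only
    rw [decide_eq_false_iff_not, pvFold_false]
    rintro ⟨i, hi, _⟩
    rw [h] at hi; simp at hi
  | some i =>
    dsimp only
    rw [PySem.List.slice_from_natCast]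
    rcases hb : (List.drop (i + 1) img).any (fun x => decide (x < 10)) with _ | _
    · rw [decide_eq_false_iff_not, pvFold_false]
      rintro ⟨j, hj, hany⟩
      rw [h] at hj
      cases Option.some_inj.mp hj
      rw [hb] at hany
      exact Bool.false_ne_true hany
    · rw [decide_eq_true_eq, pvFold_false]
      exact ⟨i, h, hb⟩
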